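-- pv_equiv track=rewrite | github.com/GHPXD/PJBL-01 | biblioteca.py | TempMinimaE
-- ===== SOURCE A (Python) =====
-- def TempMinimaE(datas,hora,temp,horario,mesA,mesB):
--     i = 1
--     menor = 0
--     for m in range (len(datas)):
--         if mesA <= datas[m][3:5] <= mesB:
--             for h in range (len(hora)):
--                 if int(hora[h]) == horario:
--                     if i == 1:
--                         menor = temp[h]
--                     elif menor > temp[h]:
--                         menor = temp[h]
--                     i = i + 1
--     return menor
-- ===== SOURCE B (Python) =====
-- def TempMinimaE(datas, hora, temp, horario, mesA, mesB):
--     if any(mesA <= d[3:5] <= mesB for d in datas):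
--         vals = [temp[h] for h, s in enumerate(hora) if int(s) == horario]
--         if vals:
--             return min(vals)
--     return 0
-- ===== Notes on version B (the rewrite author's own statement) =====
-- stated objective: simpler
-- what changed: Replaced the nested date-by-hour loops with a stateful counter-and-running-minimum (which redundantly recompute the same hourly minimum once per matching date) by one any() pass over the dates plus a single comprehension over the hours and min().
-- outside the precondition, e.g. on TempMinimaE(['01/05/10'], ['x'], [1], 0, '01', '12'): A raises ValueError, B raises ValueError; on TempMinimaE(['01/05/10'], ['8'], [], 8, '01', '12'): A raises IndexError, B raises IndexError
import Mathlib
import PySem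

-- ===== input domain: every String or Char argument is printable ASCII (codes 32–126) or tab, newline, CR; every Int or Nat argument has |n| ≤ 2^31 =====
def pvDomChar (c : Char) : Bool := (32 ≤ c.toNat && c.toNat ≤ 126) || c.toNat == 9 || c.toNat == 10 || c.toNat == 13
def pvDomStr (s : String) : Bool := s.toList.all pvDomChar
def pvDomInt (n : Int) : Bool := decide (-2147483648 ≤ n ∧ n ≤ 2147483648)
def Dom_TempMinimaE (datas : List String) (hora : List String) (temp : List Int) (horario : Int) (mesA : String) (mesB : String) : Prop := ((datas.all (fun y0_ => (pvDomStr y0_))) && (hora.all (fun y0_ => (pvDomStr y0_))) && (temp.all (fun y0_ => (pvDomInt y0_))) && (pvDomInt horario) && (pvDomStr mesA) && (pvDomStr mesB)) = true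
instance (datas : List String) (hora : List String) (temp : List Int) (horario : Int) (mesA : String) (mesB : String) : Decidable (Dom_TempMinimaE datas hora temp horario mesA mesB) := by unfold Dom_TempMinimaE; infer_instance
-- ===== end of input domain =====

-- B replaces A's nested date×hour scan (which recomputes the same hourly minimum once per
-- matching date) by one pass over the dates (any month in range?) plus one pass over the
-- hours collecting the matching temperatures and taking their min.

-- ===== PORT A =====
-- 'mesA <= s <= mesB' on strings is ported as ¬(s < mesA) ∧ ¬(mesB < s) via PySem.Chars.strLt
-- (Python's str order = code-point lexicographic order on the char lists).
def TempMinimaE (datas : List String) (hora : List String) (temp : List Int) (horario : Int) (mesA : String) (mesB : String) : Int :=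
  (datas.foldl
    (fun st d =>
      if (!(PySem.Chars.strLt (PySem.Str.slice d (some 3) (some 5)).toList mesA.toList)
          && !(PySem.Chars.strLt mesB.toList (PySem.Str.slice d (some 3) (some 5)).toList)) then
        (PySem.List.enumerate hora 0).foldl
          (fun st2 p =>
            if PySem.Int.ofStr? p.2 == some horario then
              (st2.1 + 1,
               if st2.1 == 1 then PySem.List.pyGetD temp p.1 0
               else if st2.2 > PySem.List.pyGetD temp p.1 0 then PySem.List.pyGetD temp p.1 0
               else st2.2)
            else st2) st
      else st)
    ((1 : Int), (0 : Int))).2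

-- ===== PORT B =====
def TempMinimaE_alt (datas : List String) (hora : List String) (temp : List Int) (horario : Int) (mesA : String) (mesB : String) : Int :=
  if datas.any (fun d =>
       !(PySem.Chars.strLt (PySem.Str.slice d (some 3) (some 5)).toList mesA.toList)
       && !(PySem.Chars.strLt mesB.toList (PySem.Str.slice d (some 3) (some 5)).toList)) then
    match ((PySem.List.enumerate hora 0).filter
            (fun p => PySem.Int.ofStr? p.2 == some horario)).map
            (fun p => PySem.List.pyGetD temp p.1 0) with
    | [] => 0
    | v :: vs =>
      match PySem.List.min? (v :: vs) (fun x => x) with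
      | some m => m
      | none => 0
  else 0

-- ===== PRECONDITION & SPEC =====
-- Pre_ excludes exactly the inputs on which the Python A raises: when some date's month is in
-- range, A evaluates int(hora[h]) for every h (ValueError on a non-integer string) and indexes
-- temp[h] for every matching h (IndexError when h ≥ len(temp)); B raises there identically.
def Pre_TempMinimaE (datas : List String) (hora : List String) (temp : List Int) (horario : Int) (mesA : String) (mesB : String) : Prop :=
  (∀ d ∈ datas,
     (!(PySem.Chars.strLt (PySem.Str.slice d (some 3) (some 5)).toList mesA.toList)
      && !(PySem.Chars.strLt mesB.toList (PySem.Str.slice d (some 3) (some 5)).toList)) = false)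
  ∨ ((∀ s ∈ hora, (PySem.Int.ofStr? s).isSome = true)
     ∧ ∀ p ∈ PySem.List.enumerate hora 0, PySem.Int.ofStr? p.2 = some horario → p.1 < (temp.length : Int))
instance (datas : List String) (hora : List String) (temp : List Int) (horario : Int) (mesA : String) (mesB : String) : Decidable (Pre_TempMinimaE datas hora temp horario mesA mesB) := by unfold Pre_TempMinimaE; infer_instance

def pvWitness_TempMinimaE : List String × List String × List Int × Int × String × String :=
  (["01/05/10"], ["8"], [5], 8, "01", "12")

def Spec_TempMinimaE (datas : List String) (hora : List String) (temp : List Int) (horario : Int) (mesA : String) (mesB : String) (out : Int) : Prop := out = TempMinimaE_alt datas hora temp horario mesA mesB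
instance (datas : List String) (hora : List String) (temp : List Int) (horario : Int) (mesA : String) (mesB : String) (out : Int) : Decidable (Spec_TempMinimaE datas hora temp horario mesA mesB out) := by unfold Spec_TempMinimaE; infer_instance

-- ===== CLAIM (what is proved, stated in full; the proofs are below) =====
def Claim_equal_TempMinimaE : Prop := ∀ (datas : List String) (hora : List String) (temp : List Int) (horario : Int) (mesA : String) (mesB : String), Dom_TempMinimaE datas hora temp horario mesA mesB → Pre_TempMinimaE datas hora temp horario mesA mesB → Spec_TempMinimaE datas hora temp horario mesA mesB (TempMinimaE datas hora temp horario mesA mesB)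

-- ===== LEMMAS AND PROOFS =====

-- proof-only abbreviations for the two ports' lambdas (definitionally equal to them)
def pvCond (horario : Int) (p : Int × String) : Bool := PySem.Int.ofStr? p.2 == some horario
def pvG (temp : List Int) (p : Int × String) : Int := PySem.List.pyGetD temp p.1 0
def pvMatch (mesA mesB d : String) : Bool :=
  !(PySem.Chars.strLt (PySem.Str.slice d (some 3) (some 5)).toList mesA.toList)
  && !(PySem.Chars.strLt mesB.toList (PySem.Str.slice d (some 3) (some 5)).toList)
def pvIStep (horario : Int) (temp : List Int) (st : Int × Int) (p : Int × String) : Int × Int :=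
  if pvCond horario p then
    (st.1 + 1,
     if st.1 == 1 then pvG temp p
     else if st.2 > pvG temp p then pvG temp p
     else st.2)
  else st
def pvOStep (hora : List String) (temp : List Int) (horario : Int) (mesA mesB : String) (st : Int × Int) (d : String) : Int × Int :=
  if pvMatch mesA mesB d then (PySem.List.enumerate hora 0).foldl (pvIStep horario temp) st else st

theorem portA_eq (datas hora : List String) (temp : List Int) (horario : Int) (mesA mesB : String) :
    TempMinimaE datas hora temp horario mesA mesB
      = (datas.foldl (pvOStep hora temp horario mesA mesB) ((1 : Int), (0 : Int))).2 := rfl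

theorem portB_eq (datas hora : List String) (temp : List Int) (horario : Int) (mesA mesB : String) :
    TempMinimaE_alt datas hora temp horario mesA mesB
      = if datas.any (pvMatch mesA mesB) then
          match ((PySem.List.enumerate hora 0).filter (pvCond horario)).map (pvG temp) with
          | [] => 0
          | v :: vs =>
            match PySem.List.min? (v :: vs) (fun x => x) with
            | some m => m
            | none => 0
        else 0 := rfl

-- inner loop, no matching hour: the fold is the identity
theorem inner_id (horario : Int) (temp : List Int) (l : List (Int × String))
    (h : l.filter (pvCond horario) = []) (st : Int × Int) :
    l.foldl (pvIStep horario temp) st = st := by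
  induction l generalizing st with
  | nil => rfl
  | cons a l ih =>
    rw [List.filter_cons] at h
    by_cases ha : pvCond horario a
    · simp [ha] at h
    · simp only [ha] at h
      simp only [List.foldl_cons, pvIStep, ha, if_neg, Bool.false_eq_true, not_false_iff]
      exact ih h st

-- inner loop from a counter ≥ 2: running minimum over the matching temperatures
theorem inner_ge2 (horario : Int) (temp : List Int) (l : List (Int × String))
    (i menor : Int) (hi : 2 ≤ i) :
    l.foldl (pvIStep horario temp) (i, menor)
      = (i + ((l.filter (pvCond horario)).length : Int),
         ((l.filter (pvCond horario)).map (pvG temp)).foldl min menor) := by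
  induction l generalizing i menor with
  | nil => simp
  | cons a l ih =>
    by_cases ha : pvCond horario a
    · have h1 : ((i == 1) : Bool) = false := by
        simp only [beq_eq_false_iff_ne, ne_eq]; omega
      have hmin : (if menor > pvG temp a then pvG temp a else menor) = min menor (pvG temp a) := by
        simp only [gt_iff_lt, min_def]; split_ifs <;> omega
      simp only [List.foldl_cons, pvIStep, ha, if_pos, h1, Bool.false_eq_true, if_neg,
        not_false_iff, hmin]
      rw [ih (i + 1) _ (by omega)]
      simp only [List.filter_cons, ha, if_pos, List.length_cons, List.map_cons, List.foldl_cons,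
        Prod.mk.injEq]
      exact ⟨by push_cast; ring, trivial⟩
    · simp only [List.foldl_cons, pvIStep, ha, Bool.false_eq_true, if_neg, not_false_iff]
      rw [ih i menor hi]
      simp [ha]

-- inner loop from the initial state (counter = 1), at least one matching hour
theorem inner_first (horario : Int) (temp : List Int) (l : List (Int × String))
    (menor : Int) (a : Int × String) (as : List (Int × String))
    (h : l.filter (pvCond horario) = a :: as) :
    l.foldl (pvIStep horario temp) (1, menor)
      = (2 + ((as.length : Nat) : Int), (as.map (pvG temp)).foldl min (pvG temp a)) := by
  induction l generalizing menor with
  | nil => simp at h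
  | cons x l ih =>
    rw [List.filter_cons] at h
    by_cases hx : pvCond horario x
    · simp only [hx, if_pos, List.cons.injEq] at h
      obtain ⟨rfl, hrest⟩ := h
      simp only [List.foldl_cons, pvIStep, hx, if_pos, beq_self_eq_true, if_pos]
      have := inner_ge2 horario temp l (1 + 1) (pvG temp x) (by omega)
      rw [this, hrest]
      norm_num
    · simp only [hx, Bool.false_eq_true, if_neg, not_false_iff] at h
      simp only [List.foldl_cons, pvIStep, hx, Bool.false_eq_true, if_neg, not_false_iff]
      exact ih menor h

theorem foldl_min_fix (t : List Int) (a : Int) (h : ∀ y ∈ t, a ≤ y) :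
    t.foldl min a = a := by
  rcases PySem.List.foldl_min_mem t a with hm | hm
  · exact hm
  · exact le_antisymm (PySem.List.foldl_min_le t a).1 (h _ hm)

-- outer loop when no date matches
theorem outer_none (hora : List String) (temp : List Int) (horario : Int) (mesA mesB : String)
    (ds : List String) (h : ∀ d ∈ ds, pvMatch mesA mesB d = false) (st : Int × Int) :
    ds.foldl (pvOStep hora temp horario mesA mesB) st = st := by
  induction ds generalizing st with
  | nil => rfl
  | cons d ds ih =>
    have hd := h d (List.mem_cons_self)
    simp only [List.foldl_cons, pvOStep, hd, Bool.false_eq_true, if_neg, not_false_iff]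
    exact ih (fun x hx => h x (List.mem_cons_of_mem _ hx)) st

-- outer loop when no hour matches: every step is the identity
theorem outer_id (hora : List String) (temp : List Int) (horario : Int) (mesA mesB : String)
    (hfil : (PySem.List.enumerate hora 0).filter (pvCond horario) = [])
    (ds : List String) (st : Int × Int) :
    ds.foldl (pvOStep hora temp horario mesA mesB) st = st := by
  induction ds generalizing st with
  | nil => rfl
  | cons d ds ih =>
    simp only [List.foldl_cons, pvOStep]
    by_cases hd : pvMatch mesA mesB d
    · rw [if_pos hd, inner_id horario temp _ hfil st]; exact ih st
    · rw [if_neg hd]; exact ih st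

-- once the minimum of the matching temperatures is held, further dates do not change it
theorem outer_steady (hora : List String) (temp : List Int) (horario : Int) (mesA mesB : String)
    (a : Int × String) (as : List (Int × String))
    (hfil : (PySem.List.enumerate hora 0).filter (pvCond horario) = a :: as)
    (ds : List String) (st : Int × Int)
    (hi : 2 ≤ st.1) (hm : st.2 = (as.map (pvG temp)).foldl min (pvG temp a)) :
    (ds.foldl (pvOStep hora temp horario mesA mesB) st).2
      = (as.map (pvG temp)).foldl min (pvG temp a) := by
  induction ds generalizing st with
  | nil => exact hm
  | cons d ds ih =>
    simp only [List.foldl_cons, pvOStep]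
    by_cases hd : pvMatch mesA mesB d
    · rw [if_pos hd]
      have h2 : st = (st.1, st.2) := rfl
      rw [h2, inner_ge2 horario temp _ st.1 st.2 hi, hfil]
      have hle := PySem.List.foldl_min_le (as.map (pvG temp)) (pvG temp a)
      have hfold : ((a :: as).map (pvG temp)).foldl min st.2
          = (as.map (pvG temp)).foldl min (pvG temp a) := by
        rw [hm]
        simp only [List.map_cons, List.foldl_cons]
        rw [min_eq_left hle.1]
        exact foldl_min_fix _ _ hle.2
      refine ih (st.1 + (((a :: as).length : Nat) : Int), ((a :: as).map (pvG temp)).foldl min st.2) ?_ ?_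
      · simp only []; omega
      · exact hfold
    · rw [if_neg hd]; exact ih st hi hm

-- outer loop, some date matches, some hour matches: the result is the minimum
theorem outer_main (hora : List String) (temp : List Int) (horario : Int) (mesA mesB : String)
    (a : Int × String) (as : List (Int × String))
    (hfil : (PySem.List.enumerate hora 0).filter (pvCond horario) = a :: as)
    (ds : List String) (hany : ds.any (pvMatch mesA mesB) = true) :
    (ds.foldl (pvOStep hora temp horario mesA mesB) ((1 : Int), (0 : Int))).2
      = (as.map (pvG temp)).foldl min (pvG temp a) := by
  induction ds with
  | nil => simp at hany
  | cons d ds ih =>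
    simp only [List.foldl_cons, pvOStep]
    by_cases hd : pvMatch mesA mesB d
    · rw [if_pos hd, inner_first horario temp _ 0 a as hfil]
      exact outer_steady hora temp horario mesA mesB a as hfil ds _ (by show (2:Int) ≤ 2 + ((as.length : Nat) : Int); omega) rfl
    · rw [if_neg hd]
      have : ds.any (pvMatch mesA mesB) = true := by
        simp only [List.any_cons, hd, Bool.false_or] at hany; exact hany
      exact ih this

-- B's min(vals) equals A's running minimum (both are the minimum value of vals)
theorem min?_eq_foldl_min (v : Int) (vs : List Int) :
    (match PySem.List.min? (v :: vs) (fun x => x) with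
     | some m => m
     | none => 0) = vs.foldl min v := by
  cases hm : PySem.List.min? (v :: vs) (fun x => x) with
  | none =>
    rw [PySem.List.min?_eq_none_iff] at hm
    simp at hm
  | some m =>
    have hmem := PySem.List.min?_mem hm
    have hmin := PySem.List.min?_isMin hm
    have hle := PySem.List.foldl_min_le vs v
    have h1 : m ≤ vs.foldl min v := by
      rcases PySem.List.foldl_min_mem vs v with h | h
      · rw [h]; exact hmin v List.mem_cons_self
      · exact hmin _ (List.mem_cons_of_mem _ h)
    have h2 : vs.foldl min v ≤ m := by
      rcases List.mem_cons.mp hmem with h | h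
      · rw [h] at *; exact hle.1
      · exact hle.2 _ h
    exact le_antisymm h1 h2

-- ===== VERDICT (by name: the statement is the Claim_ definition above) =====
theorem TempMinimaE_spec : Claim_equal_TempMinimaE := by
  intro datas hora temp horario mesA mesB _ _
  unfold Spec_TempMinimaE
  rw [portA_eq, portB_eq]
  by_cases hany : datas.any (pvMatch mesA mesB) = true
  · rw [if_pos hany]
    cases hfil : (PySem.List.enumerate hora 0).filter (pvCond horario) with
    | nil =>
      rw [outer_id hora temp horario mesA mesB hfil]
      rfl
    | cons a as =>
      rw [outer_main hora temp horario mesA mesB a as hfil datas hany]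
      simp only [List.map_cons]
      exact (min?_eq_foldl_min (pvG temp a) (as.map (pvG temp))).symm
  · rw [if_neg hany]
    have hall : ∀ d ∈ datas, pvMatch mesA mesB d = false := by
      intro d hd
      by_contra h
      exact hany (List.any_eq_true.mpr ⟨d, hd, by simpa using h⟩)
    rw [outer_none hora temp horario mesA mesB datas hall]
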